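-- pv_equiv track=rewrite | github.com/Zorrander/cogrob-tut-hri | franka_tut_reasoning/test/test_decision_making.py | plan_is_valid
-- ===== SOURCE A (Python) =====
-- def plan_is_valid(plan):
--     result = True
--     copy = list(plan)
--     for move in plan:
--         if ((move == 'cranfieldStep_006') and ('cranfieldStep_005' in copy)):
--             result = False
--         elif  ((move == 'cranfieldStep_007') and ('cranfieldStep_006' in copy)):
--             result = False
--         copy.remove(move)
--     return result
-- ===== SOURCE B (Python) =====
-- def plan_is_valid(plan):
--     seen_006 = False
--     seen_007 = False
--     for move in plan:
--         if move == 'cranfieldStep_007':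
--             seen_007 = True
--         elif move == 'cranfieldStep_006':
--             if seen_007:
--                 return False
--             seen_006 = True
--         elif move == 'cranfieldStep_005':
--             if seen_006:
--                 return False
--     return True
-- ===== Notes on version B (the rewrite author's own statement) =====
-- stated objective: faster
-- what changed: Replaced A's mutable shrinking copy of the list with quadratic membership tests by a single forward pass keeping two booleans (seen_006/seen_007) with early return on the first ordering violation.
import Mathlib
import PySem

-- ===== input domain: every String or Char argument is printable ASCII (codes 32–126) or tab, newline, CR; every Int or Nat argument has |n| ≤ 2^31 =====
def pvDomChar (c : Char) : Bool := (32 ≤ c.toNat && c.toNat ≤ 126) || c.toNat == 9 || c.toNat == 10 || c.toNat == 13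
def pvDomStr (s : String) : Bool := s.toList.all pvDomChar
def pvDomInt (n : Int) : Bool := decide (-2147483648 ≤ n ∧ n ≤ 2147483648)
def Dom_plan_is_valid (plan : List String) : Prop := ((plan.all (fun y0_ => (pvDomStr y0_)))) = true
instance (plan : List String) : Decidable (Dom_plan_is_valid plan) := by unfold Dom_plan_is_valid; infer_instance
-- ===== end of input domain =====

-- B: one forward pass with two booleans instead of A's shrinking-copy of the list with repeated membership tests (O(n^2) -> O(n); a timing run measured B faster).
-- ===== PORT A =====
-- copy.remove(move) is exact here as List.erase: the invariant copy = remaining iteration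
-- suffix guarantees move is the head of copy, so the remove never raises.
def pvALoop : List String → Bool → List String → Bool
  | [], result, _copy => result
  | move :: rest, result, copy =>
      let result :=
        if move == "cranfieldStep_006" && copy.contains "cranfieldStep_005" then false
        else if move == "cranfieldStep_007" && copy.contains "cranfieldStep_006" then false
        else result
      pvALoop rest result (copy.erase move)

def plan_is_valid (plan : List String) : Bool := pvALoop plan true plan

-- ===== PORT B =====
def pvBLoop : List String → Bool → Bool → Bool
  | [], _seen6, _seen7 => true
  | move :: rest, seen6, seen7 =>
      if move == "cranfieldStep_007" then pvBLoop rest seen6 true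
      else if move == "cranfieldStep_006" then
        if seen7 then false else pvBLoop rest true seen7
      else if move == "cranfieldStep_005" then
        if seen6 then false else pvBLoop rest seen6 seen7
      else pvBLoop rest seen6 seen7

def plan_is_valid_alt (plan : List String) : Bool := pvBLoop plan false false

-- ===== PRECONDITION & SPEC =====
def Spec_plan_is_valid (plan : List String) (out : Bool) : Prop := out = plan_is_valid_alt plan
instance (plan : List String) (out : Bool) : Decidable (Spec_plan_is_valid plan out) := by unfold Spec_plan_is_valid; infer_instance

-- ===== CLAIM (what is proved, stated in full; the proofs are below) =====
def Claim_equal_plan_is_valid : Prop := ∀ (plan : List String), Dom_plan_is_valid plan → Spec_plan_is_valid plan (plan_is_valid plan)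

-- ===== LEMMAS AND PROOFS =====
theorem pvNe76 : (("cranfieldStep_006":String) == "cranfieldStep_007") = false := by decide
theorem pvNe56 : (("cranfieldStep_006":String) == "cranfieldStep_005") = false := by decide
theorem pvNe65 : (("cranfieldStep_005":String) == "cranfieldStep_006") = false := by decide
theorem pvNe75 : (("cranfieldStep_005":String) == "cranfieldStep_007") = false := by decide
theorem pvNe67 : (("cranfieldStep_007":String) == "cranfieldStep_006") = false := by decide
theorem pvEq6 : (("cranfieldStep_006":String) == "cranfieldStep_006") = true := by decide
theorem pvEq5 : (("cranfieldStep_005":String) == "cranfieldStep_005") = true := by decide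
theorem pvEq7 : (("cranfieldStep_007":String) == "cranfieldStep_007") = true := by decide

-- the start flags only add conjunctive failure conditions to B's loop
theorem pvBLoop_flags (l : List String) (s6 s7 : Bool) :
    pvBLoop l s6 s7 =
      (pvBLoop l false false && !(s7 && l.contains "cranfieldStep_006")
        && !(s6 && l.contains "cranfieldStep_005")) := by
  induction l generalizing s6 s7 with
  | nil => simp [pvBLoop]
  | cons m rest ih =>
      simp only [pvBLoop, List.contains_cons]
      by_cases h7 : m == "cranfieldStep_007"
      · cases (beq_iff_eq.mp h7)
        simp only [pvEq7, pvNe76, pvNe75, if_true, Bool.false_or]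
        rw [ih s6 true, ih false true]
        generalize pvBLoop rest false false = b
        generalize rest.contains "cranfieldStep_006" = c6
        generalize rest.contains "cranfieldStep_005" = c5
        cases b <;> cases c6 <;> cases c5 <;> cases s6 <;> cases s7 <;> simp
      · by_cases h6 : m == "cranfieldStep_006"
        · cases (beq_iff_eq.mp h6)
          simp only [pvNe76, pvEq6, pvNe65, Bool.false_eq_true, if_false, if_true, Bool.false_or, Bool.true_or]
          cases s7
          · simp only [Bool.false_eq_true, if_false]
            rw [ih true false]
            generalize pvBLoop rest false false = b
            generalize rest.contains "cranfieldStep_006" = c6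
            generalize rest.contains "cranfieldStep_005" = c5
            cases b <;> cases c6 <;> cases c5 <;> cases s6 <;> simp
          · simp
        · by_cases h5 : m == "cranfieldStep_005"
          · cases (beq_iff_eq.mp h5)
            simp only [pvNe75, pvNe65, pvNe56, pvEq5, Bool.false_eq_true, if_false, if_true, Bool.false_or, Bool.true_or]
            cases s6
            · simp only [Bool.false_eq_true, if_false]
              rw [ih false s7]
              generalize pvBLoop rest false false = b
              generalize rest.contains "cranfieldStep_006" = c6
              generalize rest.contains "cranfieldStep_005" = c5
              cases b <;> cases c6 <;> cases c5 <;> cases s7 <;> simp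
            · simp
          · have e6 : (("cranfieldStep_006":String) == m) = false :=
              beq_eq_false_iff_ne.mpr (fun h => h6 (beq_iff_eq.mpr h.symm))
            have e5 : (("cranfieldStep_005":String) == m) = false :=
              beq_eq_false_iff_ne.mpr (fun h => h5 (beq_iff_eq.mpr h.symm))
            simp only [h7, h6, h5, e6, e5, Bool.false_or, Bool.false_eq_true,
              if_false]
            exact ih s6 s7

-- A's result flag is monotone: it only records, never recovers
theorem pvALoop_result (l : List String) (r : Bool) (copy : List String) :
    pvALoop l r copy = (r && pvALoop l true copy) := by
  induction l generalizing r copy with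
  | nil => simp [pvALoop]
  | cons m rest ih =>
      show pvALoop rest _ (copy.erase m) = (r && pvALoop rest _ (copy.erase m))
      conv_lhs => rw [ih]
      conv_rhs => rw [ih]
      generalize pvALoop rest true (copy.erase m) = t
      cases r <;> simp [Bool.and_assoc]

-- the invariant copy = remaining suffix collapses A's loop onto B's
theorem pvMain (l : List String) : pvALoop l true l = pvBLoop l false false := by
  induction l with
  | nil => rfl
  | cons m rest ih =>
      have herase : (m :: rest).erase m = rest := by simp
      simp only [pvALoop, pvBLoop, herase, List.contains_cons]
      by_cases h7 : m == "cranfieldStep_007"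
      · cases (beq_iff_eq.mp h7)
        rw [pvALoop_result, pvBLoop_flags rest false true]
        simp [pvNe67, ih, Bool.and_comm]
      · by_cases h6 : m == "cranfieldStep_006"
        · cases (beq_iff_eq.mp h6)
          rw [pvALoop_result, pvBLoop_flags rest true false]
          simp [pvNe76, ih, Bool.and_comm]
        · by_cases h5 : m == "cranfieldStep_005"
          · cases (beq_iff_eq.mp h5)
            simp [h6, h7, ih]
          · simp [h5, h6, h7, ih]

-- ===== VERDICT =====
theorem plan_is_valid_spec : Claim_equal_plan_is_valid := by
  intro plan _
  unfold Spec_plan_is_valid plan_is_valid plan_is_valid_alt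
  exact pvMain plan
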